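-- pv_equiv track=rewrite | github.com/sunilsoni/interview-notes-python | com/interview/2024/oct/process_request.py | solution
-- ===== SOURCE A (Python) =====
-- class LoadBalancer:
--     def __init__(self, serversPowers):
--         self.powers = serversPowers
--         self.capacities = serversPowers.copy()
--         self.active = [True] * len(serversPowers)
--         self.requests_served = [0] * len(serversPowers)
--         self.current_server = 0
--
--     def process_request(self):
--         start = self.current_server
--         while True:
--             if self.active[self.current_server] and self.capacities[self.current_server] > 0:
--                 self.capacities[self.current_server] -= 1
--                 self.requests_served[self.current_server] += 1
--                 self.current_server = (self.current_server + 1) % len(self.powers)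
--                 return
--             self.current_server = (self.current_server + 1) % len(self.powers)
--             if self.current_server == start:
--                 self.reset_capacities()
--
--     def fail_server(self, index):
--         self.active[index] = False
--
--     def reset_capacities(self):
--         for i in range(len(self.powers)):
--             if self.active[i]:
--                 self.capacities[i] = self.powers[i]
--
--     def get_most_served_server(self):
--         max_requests = max(self.requests_served)
--         for i in range(len(self.requests_served) - 1, -1, -1):
--             if self.requests_served[i] == max_requests:
--                 return i
--
-- def solution(serversPowers, events):
--     lb = LoadBalancer(serversPowers)
--     for event in events:
--         if event == "REQUEST":
--             lb.process_request()
--         elif event.startswith("FAIL"):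
--             server_index = int(event.split()[1])
--             lb.fail_server(server_index)
--     return lb.get_most_served_server()
-- ===== SOURCE B (Python) =====
-- from collections import deque
--
-- def solution(serversPowers, events):
--     # Round-robin via a deque of (server index, remaining capacity) for the servers
--     # that currently have capacity left: a request pops the head; the deque is rebuilt
--     # from the powers (in cyclic order from the current pointer) once it runs dry.
--     n = len(serversPowers)
--     served = [0] * n
--     active = [True] * n
--     cur = 0
--     q = deque((i, c) for i, c in enumerate(serversPowers) if c > 0)
--     for event in events:
--         if event == "REQUEST":
--             if not q:
--                 q = deque(((cur + j) % n, serversPowers[(cur + j) % n])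
--                           for j in range(n)
--                           if active[(cur + j) % n] and serversPowers[(cur + j) % n] > 0)
--             i, c = q.popleft()
--             served[i] += 1
--             if c > 1:
--                 q.append((i, c - 1))
--             cur = (i + 1) % n
--         elif event.startswith("FAIL"):
--             active[int(event.split()[1])] = False
--             q = deque(p for p in q if active[p[0]])
--     return max(range(n), key=lambda i: (served[i], i))
-- ===== Notes on version B (the rewrite author's own statement) =====
-- stated objective: alternative
-- what changed: B replaces A's per-request cyclic scan over the whole server array (with reset-on-wrap) by a deque of the currently serviceable servers kept in round-robin order, so each request pops the deque head and the array is only rescanned to rebuild the deque when it runs dry; the final tie-break (last index with the maximal count) is a single max over (count, index) pairs instead of max-then-backward-scan. …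
import Mathlib
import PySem

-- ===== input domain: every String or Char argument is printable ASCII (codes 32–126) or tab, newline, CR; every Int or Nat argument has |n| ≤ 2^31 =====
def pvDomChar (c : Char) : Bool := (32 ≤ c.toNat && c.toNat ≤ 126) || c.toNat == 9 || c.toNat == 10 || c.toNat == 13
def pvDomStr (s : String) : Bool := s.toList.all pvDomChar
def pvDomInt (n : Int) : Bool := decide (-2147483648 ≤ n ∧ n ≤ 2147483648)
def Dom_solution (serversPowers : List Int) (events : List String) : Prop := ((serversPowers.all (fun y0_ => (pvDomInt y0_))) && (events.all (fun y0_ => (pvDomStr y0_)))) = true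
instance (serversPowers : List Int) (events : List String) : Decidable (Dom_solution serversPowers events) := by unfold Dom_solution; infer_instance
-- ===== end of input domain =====

-- B replaces A's per-request cyclic scan over all servers by a deque of the currently
-- serviceable (active, capacity > 0) servers kept in round-robin order: each request pops the
-- deque head, and the server list is only revisited to rebuild the deque when it runs dry.
-- Equivalence of the returned value is proved on Pre_solution.

-- ===== PORT A =====
structure LBA where
  powers : List Int
  capacities : List Int
  active : List Bool
  served : List Int
  cur : Nat
deriving Repr, DecidableEq

def pvInitA (sp : List Int) : LBA :=
  { powers := sp, capacities := sp,
    active := List.replicate sp.length true,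
    served := List.replicate sp.length 0,
    cur := 0 }

-- reset_capacities: for i in range(n): if active[i]: capacities[i] = powers[i]
def pvResetA (st : LBA) : LBA :=
  let caps' := (List.range st.powers.length).foldl
    (fun caps i => if st.active.getD i false then caps.set i (st.powers.getD i 0) else caps)
    st.capacities
  { st with capacities := caps' }

-- the 'while True' of process_request, with fuel (2n+2 always suffices under Pre_);
-- running out of fuel = the Python loop diverges (excluded by Pre_solution)
def pvScanA (start : Nat) : Nat → LBA → LBA
  | 0, st => st
  | fuel+1, st =>
    if st.active.getD st.cur false && decide (st.capacities.getD st.cur 0 > 0) then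
      { st with
        capacities := st.capacities.set st.cur (st.capacities.getD st.cur 0 - 1),
        served := st.served.set st.cur (st.served.getD st.cur 0 + 1),
        cur := (st.cur + 1) % st.powers.length }
    else
      let st' := { st with cur := (st.cur + 1) % st.powers.length }
      pvScanA start fuel (if st'.cur = start then pvResetA st' else st')

def pvProcessA (st : LBA) : LBA := pvScanA st.cur (2 * st.powers.length + 2) st

def pvStepA (st : LBA) (e : String) : LBA :=
  if e = "REQUEST" then pvProcessA st
  else if PySem.Str.startswith e "FAIL" then
    match (PySem.List.pyGet? (PySem.Str.split₀ e) 1).bind PySem.Int.ofStr? with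
    | none => st          -- IndexError / ValueError: excluded by Pre_solution
    | some idx => { st with active := PySem.List.pySetD st.active idx false }
  else st

-- get_most_served_server: max(served), then scan i = n-1 … 0 for the first hit
def pvMostA (st : LBA) : Int :=
  match PySem.List.max? st.served (fun x => x) with
  | none => 0             -- max([]) raises ValueError: excluded by Pre_solution
  | some m =>
    match (PySem.List.pyRange ((st.served.length : Int) - 1) (-1) (-1)).find?
            (fun i => PySem.List.pyGetD st.served i 0 == m) with
    | some i => i
    | none => 0           -- unreachable (the max is in the list)

def solution (serversPowers : List Int) (events : List String) : Int :=
  pvMostA (events.foldl pvStepA (pvInitA serversPowers))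

-- ===== PORT B =====
structure StB where
  served : List Int
  active : List Bool
  cur : Nat
  q : List (Nat × Int)    -- deque of (server index, remaining capacity), round-robin order
deriving Repr, DecidableEq

def pvInitB (sp : List Int) : StB :=
  { served := List.replicate sp.length 0,
    active := List.replicate sp.length true,
    cur := 0,
    q := ((List.range sp.length).map (fun i => (i, sp.getD i 0))).filter (fun p => decide (p.2 > 0)) }

def pvStepB (sp : List Int) (st : StB) (e : String) : StB :=
  let n := sp.length
  if e = "REQUEST" then
    let q := if st.q.isEmpty then
        ((List.range n).map (fun j => ((st.cur + j) % n, sp.getD ((st.cur + j) % n) 0))).filter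
          (fun p => st.active.getD p.1 false && decide (p.2 > 0))
      else st.q
    match q with
    | [] => st            -- popleft from empty deque raises: excluded by Pre_solution
    | (i, c) :: rest =>
      { served := st.served.set i (st.served.getD i 0 + 1),
        active := st.active,
        cur := (i + 1) % n,
        q := if c > 1 then rest ++ [(i, c - 1)] else rest }
  else if PySem.Str.startswith e "FAIL" then
    match (PySem.List.pyGet? (PySem.Str.split₀ e) 1).bind PySem.Int.ofStr? with
    | none => st          -- IndexError / ValueError: excluded by Pre_solution
    | some idx =>
      let act' := PySem.List.pySetD st.active idx false
      { st with active := act', q := st.q.filter (fun p => act'.getD p.1 false) }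
  else st

def pvMostB (n : Nat) (served : List Int) : Int :=
  match PySem.List.max2? (PySem.List.pyRange 0 (n : Int) 1)
          (fun i => PySem.List.pyGetD served i 0) (fun i => i) with
  | some i => i
  | none => 0             -- max of empty range raises: excluded by Pre_solution

def solution_alt (serversPowers : List Int) (events : List String) : Int :=
  pvMostB serversPowers.length (events.foldl (pvStepB serversPowers) (pvInitB serversPowers)).served

-- ===== PRECONDITION & SPEC =====
-- the (normalised, Nat) server index a FAIL-prefixed event names, if it parses
def pvFailIdx? (e : String) : Option Int :=
  if PySem.Str.startswith e "FAIL" then (PySem.List.pyGet? (PySem.Str.split₀ e) 1).bind PySem.Int.ofStr? else none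

def pvFailNorm? (n : Nat) (e : String) : Option Nat :=
  (pvFailIdx? e).map (fun idx => (if idx < 0 then idx + (n : Int) else idx).toNat)

-- Pre_solution = exactly the inputs on which A returns normally: a nonempty server list,
-- every FAIL-prefixed event carries a parseable in-range index (else IndexError/ValueError),
-- and at each REQUEST some not-yet-failed server has positive power (else A loops forever).
def Pre_solution (serversPowers : List Int) (events : List String) : Prop :=
  serversPowers ≠ [] ∧
  (∀ e ∈ events, PySem.Str.startswith e "FAIL" = true →
      ∃ idx : Int, pvFailIdx? e = some idx ∧ -(serversPowers.length : Int) ≤ idx ∧ idx < serversPowers.length) ∧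
  (∀ k, (hk : k < events.length) → events[k] = "REQUEST" →
      ∃ i : Nat, i < serversPowers.length ∧ serversPowers.getD i 0 > 0 ∧
        ∀ j, (hj : j < k) → pvFailNorm? serversPowers.length (events[j]'(by omega)) ≠ some i)

instance (serversPowers : List Int) (events : List String) : Decidable (Pre_solution serversPowers events) := by
  unfold Pre_solution; infer_instance

def pvWitness_solution : List Int × List String := ([2, 1], ["REQUEST", "FAIL 0", "REQUEST", "REQUEST"])

def Spec_solution (serversPowers : List Int) (events : List String) (out : Int) : Prop := out = solution_alt serversPowers events
instance (serversPowers : List Int) (events : List String) (out : Int) : Decidable (Spec_solution serversPowers events out) := by unfold Spec_solution; infer_instance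

-- ===== CLAIM (what is proved, stated in full; the proofs are below) =====
def Claim_equal_solution : Prop := ∀ (serversPowers : List Int) (events : List String), Dom_solution serversPowers events → Pre_solution serversPowers events → Spec_solution serversPowers events (solution serversPowers events)

-- ===== LEMMAS AND PROOFS =====

-- a server is eligible when it is active and has remaining capacity
def pvElig (caps : List Int) (act : List Bool) (i : Nat) : Bool :=
  act.getD i false && decide (caps.getD i 0 > 0)

-- the server indices in cyclic order starting at cur
def pvRot (n cur : Nat) : List Nat := (List.range n).map (fun j => (cur + j) % n)

-- the deque a state of A corresponds to
def pvQof (a : LBA) : List (Nat × Int) :=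
  ((pvRot a.powers.length a.cur).filter (pvElig a.capacities a.active)).map
    (fun i => (i, a.capacities.getD i 0))

-- the bisimulation invariant between A's and B's states
def pvRel (sp : List Int) (a : LBA) (b : StB) : Prop :=
  a.powers = sp ∧ a.capacities.length = sp.length ∧ a.active.length = sp.length ∧
  a.served.length = sp.length ∧ a.cur < sp.length ∧
  b.served = a.served ∧ b.active = a.active ∧ b.cur = a.cur ∧ b.q = pvQof a

-- the state after serving server i (the eligible branch of A's scan loop)
def pvServe (a : LBA) (i : Nat) : LBA :=
  { a with capacities := a.capacities.set i (a.capacities.getD i 0 - 1),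
           served := a.served.set i (a.served.getD i 0 + 1),
           cur := (i + 1) % a.powers.length }

-- ---- generic index arithmetic ----

lemma pvMod_add_cancel {n a b : Nat} (ha : a < n) (hb : b < n) {c : Nat}
    (h : (c + a) % n = (c + b) % n) : a = b := by
  have h2 : a ≡ b [MOD n] := Nat.ModEq.add_left_cancel' c h
  unfold Nat.ModEq at h2
  rwa [Nat.mod_eq_of_lt ha, Nat.mod_eq_of_lt hb] at h2

lemma pvRot_length (n cur : Nat) : (pvRot n cur).length = n := by
  simp [pvRot]

lemma pvRot_getElem (n cur t : Nat) (ht : t < n) :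
    (pvRot n cur)[t]'(by simp [pvRot_length, ht]) = (cur + t) % n := by
  simp [pvRot]

lemma pvRot_getElem? (n cur t : Nat) (ht : t < n) :
    (pvRot n cur)[t]? = some ((cur + t) % n) := by
  simp [pvRot, ht]

lemma pvRot_lt {n cur i : Nat} (h : i ∈ pvRot n cur) : i < n := by
  simp only [pvRot, List.mem_map, List.mem_range] at h
  obtain ⟨j, hj, rfl⟩ := h
  exact Nat.mod_lt _ (by omega)

lemma pvRot_mem {n cur : Nat} (hc : cur < n) {i : Nat} (hi : i < n) : i ∈ pvRot n cur := by
  simp only [pvRot, List.mem_map, List.mem_range]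
  by_cases hci : cur ≤ i
  · exact ⟨i - cur, by omega, by rw [Nat.add_sub_cancel' hci, Nat.mod_eq_of_lt hi]⟩
  · refine ⟨n + i - cur, by omega, ?_⟩
    have : cur + (n + i - cur) = n + i := by omega
    rw [this, Nat.add_mod_left, Nat.mod_eq_of_lt hi]

lemma pvRot_nodup {n cur : Nat} (_hc : cur < n) : (pvRot n cur).Nodup := by
  refine List.Nodup.map_on ?_ (List.nodup_range)
  intro x hx y hy hxy
  exact pvMod_add_cancel (List.mem_range.mp hx) (List.mem_range.mp hy) hxy

lemma pvRot_rotate {n cur : Nat} (hc : cur < n) {k : Nat} (hk : k ≤ n) :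
    pvRot n ((cur + k) % n) = (pvRot n cur).drop k ++ (pvRot n cur).take k := by
  have hn : 0 < n := by omega
  apply List.ext_getElem
  · simp [pvRot_length]; omega
  · intro t h1 h2
    have ht : t < n := by simpa [pvRot_length] using h1
    rw [pvRot_getElem n _ t ht, List.getElem_append]
    have hdl : ((pvRot n cur).drop k).length = n - k := by simp [pvRot_length]
    split
    · next hlt =>
      rw [List.getElem_drop, pvRot_getElem n cur (k + t) (by rw [hdl] at hlt; omega)]
      rw [Nat.mod_add_mod, Nat.add_assoc]
    · next hge =>
      rw [hdl] at hge
      have ht2 : t - (n - k) < k := by omega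
      simp only [hdl]
      rw [List.getElem_take, pvRot_getElem n cur (t - (n - k)) (by omega)]
      have : cur + k + t = cur + (t - (n - k)) + n := by omega
      rw [Nat.mod_add_mod, this, Nat.add_mod_right]

-- ---- reset ----

lemma pvGetD_set {α : Type} {d : α} (c : List α) (i : Nat) (v : α) (hi : i < c.length) (k : Nat) :
    (c.set i v).getD k d = if k = i then v else c.getD k d := by
  by_cases h : k = i
  · subst h
    simp [List.getD_eq_getElem?_getD, hi]
  · have hne : i ≠ k := fun hh => h hh.symm
    simp [List.getD_eq_getElem?_getD, h, hne]

lemma pvFoldlSet_length (f : Nat → Int) (g : Nat → Bool) :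
    ∀ (L : List Nat) (c : List Int),
      (L.foldl (fun c i => if g i then c.set i (f i) else c) c).length = c.length := by
  intro L
  induction L with
  | nil => intro c; rfl
  | cons i L ih =>
    intro c
    simp only [List.foldl_cons]
    rw [ih]
    split <;> simp

lemma pvFoldlSet_getD (f : Nat → Int) (g : Nat → Bool) :
    ∀ (L : List Nat) (c : List Int), (∀ i ∈ L, i < c.length) → ∀ (k : Nat),
      (L.foldl (fun c i => if g i then c.set i (f i) else c) c).getD k 0 =
        if k ∈ L ∧ g k = true then f k else c.getD k 0 := by
  intro L
  induction L with
  | nil => intro c _ k; simp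
  | cons i L ih =>
    intro c hlen k
    simp only [List.foldl_cons]
    have hlen' : ∀ j ∈ L, j < (if g i = true then c.set i (f i) else c).length := by
      intro j hj; split <;> simpa using hlen j (List.mem_cons_of_mem _ hj)
    rw [ih _ hlen' k]
    by_cases hkL : k ∈ L ∧ g k = true
    · simp [hkL]
    · simp only [if_neg hkL]
      by_cases hgi : g i = true
      · rw [if_pos hgi, pvGetD_set c i (f i) (hlen i (List.mem_cons_self)) k]
        by_cases hk : k = i
        · subst hk; simp [hgi]
        · simp only [if_neg hk]
          have : ¬(k ∈ i :: L ∧ g k = true) := by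
            rintro ⟨hm, hg⟩
            rcases List.mem_cons.mp hm with h | h
            · exact hk h
            · exact hkL ⟨h, hg⟩
          rw [if_neg this]
      · rw [if_neg hgi]
        have : ¬(k ∈ i :: L ∧ g k = true) := by
          rintro ⟨hm, hg⟩
          rcases List.mem_cons.mp hm with h | h
          · subst h; exact hgi hg
          · exact hkL ⟨h, hg⟩
        rw [if_neg this]

lemma pvResetA_getD (st : LBA) (hc : st.capacities.length = st.powers.length) (k : Nat) :
    (pvResetA st).capacities.getD k 0 =
      if k < st.powers.length ∧ st.active.getD k false = true
      then st.powers.getD k 0 else st.capacities.getD k 0 := by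
  unfold pvResetA
  simp only []
  rw [pvFoldlSet_getD (fun i => st.powers.getD i 0) (fun i => st.active.getD i false)
      (List.range st.powers.length) st.capacities
      (by intro i hi; rw [hc]; exact List.mem_range.mp hi) k]
  simp [List.mem_range]

lemma pvResetA_length (st : LBA) :
    (pvResetA st).capacities.length = st.capacities.length := by
  unfold pvResetA
  exact pvFoldlSet_length _ _ _ _

lemma pvResetA_served (st : LBA) : (pvResetA st).served = st.served := rfl

-- ---- the scan loop ----

lemma pvScan_find (sp : List Int) : ∀ (fuel d j : Nat) (start : Nat) (a : LBA),
    a.powers = sp → start < sp.length → j ≤ d → d < sp.length →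
    a.cur = (start + j) % sp.length →
    (∀ t, j ≤ t → t < d → pvElig a.capacities a.active ((start + t) % sp.length) = false) →
    pvElig a.capacities a.active ((start + d) % sp.length) = true →
    d - j < fuel →
    pvScanA start fuel a = pvServe a ((start + d) % sp.length) := by
  intro fuel
  induction fuel with
  | zero => intro d j start a _ _ _ _ _ _ _ hf; omega
  | succ fuel ih =>
    intro d j start a hp hst hjd hdn hacur h1 h2 hf
    subst hp
    have hn : 0 < a.powers.length := by omega
    by_cases hj : j = d
    · subst hj
      rw [pvScanA]
      have hcond : (a.active.getD a.cur false && decide (a.capacities.getD a.cur 0 > 0)) = true := by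
        rw [hacur]; exact h2
      rw [if_pos hcond]
      unfold pvServe
      rw [hacur]
    · have hlt : j < d := by omega
      rw [pvScanA]
      have hcond : (a.active.getD a.cur false && decide (a.capacities.getD a.cur 0 > 0)) = false := by
        rw [hacur]; exact h1 j le_rfl hlt
      rw [if_neg (by rw [hcond]; exact Bool.false_ne_true)]
      rw [hacur]
      have hcur' : ((start + j) % a.powers.length + 1) % a.powers.length
          = (start + (j + 1)) % a.powers.length := by
        rw [Nat.mod_add_mod, Nat.add_assoc]
      dsimp only
      rw [hcur']
      have hnr : (start + (j + 1)) % a.powers.length ≠ start := by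
        intro hcontra
        have h0 : (start + 0) % a.powers.length = start := by
          rw [Nat.add_zero, Nat.mod_eq_of_lt hst]
        have := pvMod_add_cancel (a := j + 1) (b := 0) (n := a.powers.length) (by omega) hn
          (by rw [hcontra, h0])
        omega
      rw [if_neg hnr]
      exact ih d (j + 1) start { a with cur := (start + (j + 1)) % a.powers.length }
        rfl hst (by omega) hdn rfl (fun t ht1 ht2 => h1 t (by omega) ht2) h2 (by omega)

lemma pvScan_walk (sp : List Int) : ∀ (fuel j : Nat) (start : Nat) (a : LBA),
    a.powers = sp → start < sp.length → j < sp.length →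
    a.cur = (start + j) % sp.length →
    (∀ i, i < sp.length → pvElig a.capacities a.active i = false) →
    sp.length - j ≤ fuel →
    pvScanA start fuel a =
      pvScanA start (fuel - (sp.length - j)) (pvResetA { a with cur := start }) := by
  intro fuel
  induction fuel with
  | zero => intro j start a _ _ hj _ _ hf; omega
  | succ fuel ih =>
    intro j start a hp hst hj hacur hall hf
    subst hp
    have hn : 0 < a.powers.length := by omega
    rw [pvScanA]
    have hcond : (a.active.getD a.cur false && decide (a.capacities.getD a.cur 0 > 0)) = false := by
      have := hall a.cur (by rw [hacur]; exact Nat.mod_lt _ hn)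
      unfold pvElig at this; exact this
    rw [if_neg (by rw [hcond]; exact Bool.false_ne_true)]
    rw [hacur]
    have hcur' : ((start + j) % a.powers.length + 1) % a.powers.length
        = (start + (j + 1)) % a.powers.length := by
      rw [Nat.mod_add_mod, Nat.add_assoc]
    dsimp only
    rw [hcur']
    by_cases hj1 : j + 1 = a.powers.length
    · have hcs : (start + (j + 1)) % a.powers.length = start := by
        rw [hj1, Nat.add_mod_right, Nat.mod_eq_of_lt hst]
      rw [hcs, if_pos rfl]
      have harith : a.powers.length - j = 1 := by omega
      rw [harith]
      rfl
    · have hnr : (start + (j + 1)) % a.powers.length ≠ start := by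
        intro hcontra
        have h0 : (start + 0) % a.powers.length = start := by
          rw [Nat.add_zero, Nat.mod_eq_of_lt hst]
        have := pvMod_add_cancel (a := j + 1) (b := 0) (n := a.powers.length) (by omega) hn
          (by rw [hcontra, h0])
        omega
      rw [if_neg hnr]
      have heq := ih (j + 1) start { a with cur := (start + (j + 1)) % a.powers.length }
        rfl hst (by omega) rfl hall (by omega)
      rw [heq]
      have harith : fuel - (a.powers.length - (j + 1)) = fuel + 1 - (a.powers.length - j) := by omega
      rw [harith]

lemma pvQof_decomp (sp : List Int) (a : LBA) (i0 : Nat) (c : Int) (rest : List (Nat × Int))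
    (hp : a.powers = sp) (hq : pvQof a = (i0, c) :: rest) :
    ∃ l1 l2, pvRot sp.length a.cur = l1 ++ i0 :: l2 ∧
      (∀ x ∈ l1, pvElig a.capacities a.active x = false) ∧
      pvElig a.capacities a.active i0 = true ∧
      c = a.capacities.getD i0 0 ∧
      rest = (l2.filter (pvElig a.capacities a.active)).map
        (fun i => (i, a.capacities.getD i 0)) := by
  unfold pvQof at hq
  rw [hp] at hq
  rcases List.map_eq_cons_iff.mp hq with ⟨x, l', hfil, hpair, hmap⟩
  obtain ⟨hx, hc⟩ : x = i0 ∧ a.capacities.getD x 0 = c := by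
    constructor <;> [exact congrArg Prod.fst hpair; exact congrArg Prod.snd hpair]
  subst hx
  rcases List.filter_eq_cons_iff.mp hfil with ⟨l1, l2, hrot, hl1, helig, hl2⟩
  exact ⟨l1, l2, hrot,
    fun y hy => Bool.eq_false_iff.mpr (hl1 y hy), helig, hc.symm, by rw [← hmap, hl2]⟩

lemma pvScan_serves (sp : List Int) (a : LBA) (fuel : Nat) (i0 : Nat) (c : Int)
    (rest : List (Nat × Int))
    (hp : a.powers = sp) (hcur : a.cur < sp.length)
    (hq : pvQof a = (i0, c) :: rest) (hfuel : sp.length ≤ fuel) :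
    pvScanA a.cur fuel a = pvServe a i0 ∧ c = a.capacities.getD i0 0 := by
  obtain ⟨l1, l2, hrot, hl1, helig, hc, -⟩ := pvQof_decomp sp a i0 c rest hp hq
  have hlen : l1.length + 1 + l2.length = sp.length := by
    have := congrArg List.length hrot
    simp [pvRot_length] at this
    omega
  have hd : l1.length < sp.length := by omega
  have hi0 : (a.cur + l1.length) % sp.length = i0 := by
    have h1 : (pvRot sp.length a.cur)[l1.length]? = some i0 := by
      rw [hrot, List.getElem?_append_right le_rfl]
      simp
    rw [pvRot_getElem? _ _ _ hd] at h1
    exact Option.some.inj h1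
  refine ⟨?_, hc⟩
  have hfind := pvScan_find sp fuel l1.length 0 a.cur a hp hcur (Nat.zero_le _) hd
    (by rw [Nat.add_zero, Nat.mod_eq_of_lt hcur])
    ?_ (by rw [hi0]; exact helig) (by omega)
  · rw [hfind, hi0]
  · intro t _ htd
    have h1 : (pvRot sp.length a.cur)[t]? = some ((a.cur + t) % sp.length) :=
      pvRot_getElem? _ _ _ (by omega)
    rw [hrot, List.getElem?_append_left (by omega)] at h1
    exact hl1 _ (List.mem_of_getElem? h1)

-- ---- the deque after one serve ----

lemma pvQof_head_lt (sp : List Int) (a : LBA) (i0 : Nat) (c : Int) (rest : List (Nat × Int))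
    (hp : a.powers = sp) (hq : pvQof a = (i0, c) :: rest) : i0 < sp.length := by
  have hm : (i0, c) ∈ pvQof a := by rw [hq]; exact List.mem_cons_self
  unfold pvQof at hm
  rw [hp] at hm
  rcases List.mem_map.mp hm with ⟨x, hx, hpair⟩
  have : x = i0 := congrArg Prod.fst hpair
  subst this
  exact pvRot_lt (List.mem_of_mem_filter hx)


lemma pvServe_q (sp : List Int) (a : LBA) (i0 : Nat) (c : Int) (rest : List (Nat × Int))
    (hp : a.powers = sp) (hcur : a.cur < sp.length) (hcl : a.capacities.length = sp.length)
    (hq : pvQof a = (i0, c) :: rest) :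
    pvQof (pvServe a i0) = if c > 1 then rest ++ [(i0, c - 1)] else rest := by
  obtain ⟨l1, l2, hrot, hl1, helig, hc, hrest⟩ := pvQof_decomp sp a i0 c rest hp hq
  have hi0n : i0 < sp.length := pvQof_head_lt sp a i0 c rest hp hq
  have hi0len : i0 < a.capacities.length := by omega
  have hlen : l1.length + 1 + l2.length = sp.length := by
    have := congrArg List.length hrot
    simp [pvRot_length] at this
    omega
  have hd : l1.length < sp.length := by omega
  have hi0 : (a.cur + l1.length) % sp.length = i0 := by
    have h1 : (pvRot sp.length a.cur)[l1.length]? = some i0 := by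
      rw [hrot, List.getElem?_append_right le_rfl]
      simp
    rw [pvRot_getElem? _ _ _ hd] at h1
    exact Option.some.inj h1
  -- i0 occurs nowhere in l1 or l2
  have hnd := pvRot_nodup (n := sp.length) hcur
  rw [hrot, List.nodup_append] at hnd
  obtain ⟨-, hndc, hdisj⟩ := hnd
  have hi0l2 : i0 ∉ l2 := (List.nodup_cons.mp hndc).1
  have hi0l1 : i0 ∉ l1 := fun hmem => (hdisj i0 hmem i0 List.mem_cons_self) rfl
  -- the rotated order after the serve
  have hcur' : (i0 + 1) % sp.length = (a.cur + (l1.length + 1)) % sp.length := by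
    rw [← hi0, Nat.mod_add_mod, Nat.add_assoc]
  have hsplit : pvRot sp.length a.cur = (l1 ++ [i0]) ++ l2 := by
    rw [hrot]; simp
  have hrot' : pvRot sp.length ((i0 + 1) % sp.length) = l2 ++ (l1 ++ [i0]) := by
    rw [hcur', pvRot_rotate hcur (by omega)]
    rw [hsplit, List.drop_left' (by simp), List.take_left' (by simp)]
  -- eligibility after the serve
  have hact : a.active.getD i0 false = true := by
    have h := helig
    simp only [pvElig, Bool.and_eq_true] at h
    exact h.1
  have hcaps' : ∀ k, (a.capacities.set i0 (a.capacities.getD i0 0 - 1)).getD k 0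
      = if k = i0 then c - 1 else a.capacities.getD k 0 := by
    intro k
    rw [pvGetD_set _ _ _ hi0len, hc]
  have helig' : ∀ x, x ≠ i0 →
      pvElig (a.capacities.set i0 (a.capacities.getD i0 0 - 1)) a.active x
        = pvElig a.capacities a.active x := by
    intro x hx
    unfold pvElig
    rw [hcaps' x, if_neg hx]
  unfold pvQof pvServe
  dsimp only
  rw [hp, hrot']
  rw [List.filter_append, List.filter_append]
  have hfl2 : l2.filter (pvElig (a.capacities.set i0 (a.capacities.getD i0 0 - 1)) a.active)
      = l2.filter (pvElig a.capacities a.active) := by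
    apply List.filter_congr
    intro x hx
    exact helig' x (fun hh => hi0l2 (hh ▸ hx))
  have hfl1 : l1.filter (pvElig (a.capacities.set i0 (a.capacities.getD i0 0 - 1)) a.active)
      = [] := by
    rw [List.filter_eq_nil_iff]
    intro x hx
    rw [helig' x (fun hh => hi0l1 (hh ▸ hx)), hl1 x hx]
    simp
  have hfi0 : [i0].filter (pvElig (a.capacities.set i0 (a.capacities.getD i0 0 - 1)) a.active)
      = if c - 1 > 0 then [i0] else [] := by
    have helig0 : pvElig (a.capacities.set i0 (a.capacities.getD i0 0 - 1)) a.active i0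
        = decide (c - 1 > 0) := by
      unfold pvElig
      rw [hcaps' i0, if_pos rfl, hact]
      simp
    simp only [List.filter_cons, List.filter_nil, helig0]
    by_cases hgt : c - 1 > 0
    · rw [if_pos (by simpa using hgt), if_pos hgt]
    · rw [if_neg (by simpa using hgt), if_neg hgt]
  rw [hfl2, hfl1, hfi0, List.map_append, List.map_append]
  have hmapl2 : (l2.filter (pvElig a.capacities a.active)).map
        (fun i => (i, (a.capacities.set i0 (a.capacities.getD i0 0 - 1)).getD i 0))
      = rest := by
    rw [hrest]
    apply List.map_congr_left
    intro x hx
    have hxl2 : x ∈ l2 := List.mem_of_mem_filter hx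
    have hxne : x ≠ i0 := fun hh => hi0l2 (hh ▸ hxl2)
    rw [hcaps' x, if_neg hxne]
  rw [hmapl2]
  by_cases hcgt : c > 1
  · rw [if_pos (by omega : c - 1 > 0), if_pos hcgt]
    simp
    simpa using hcaps' i0
  · rw [if_neg (by omega : ¬(c - 1 > 0)), if_neg hcgt]
    simp

-- ---- the rebuilt deque equals the deque of the reset state ----

lemma pvReset_q (sp : List Int) (a : LBA)
    (hp : a.powers = sp) (hcl : a.capacities.length = sp.length) :
    pvQof (pvResetA a) =
      ((List.range sp.length).map
          (fun j => ((a.cur + j) % sp.length, sp.getD ((a.cur + j) % sp.length) 0))).filter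
        (fun p => a.active.getD p.1 false && decide (p.2 > 0)) := by
  have hgetD := pvResetA_getD a (by rw [hp]; exact hcl)
  simp only [hp] at hgetD
  have hmapeq : (List.range sp.length).map
        (fun j => ((a.cur + j) % sp.length, sp.getD ((a.cur + j) % sp.length) 0))
      = (pvRot sp.length a.cur).map (fun i => (i, sp.getD i 0)) := by
    unfold pvRot
    rw [List.map_map]
    rfl
  rw [hmapeq, List.filter_map]
  unfold pvQof
  change List.map (fun i => (i, (pvResetA a).capacities.getD i 0))
      (List.filter (pvElig (pvResetA a).capacities a.active)
        (pvRot a.powers.length a.cur)) = _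
  rw [hp]
  have hfilter : (pvRot sp.length a.cur).filter (pvElig (pvResetA a).capacities a.active)
      = (pvRot sp.length a.cur).filter
          ((fun p => a.active.getD p.1 false && decide (p.2 > 0)) ∘ (fun i => (i, sp.getD i 0))) := by
    apply List.filter_congr
    intro x hx
    have hxn : x < sp.length := pvRot_lt hx
    unfold pvElig
    simp only [Function.comp]
    by_cases hax : a.active.getD x false = true
    · rw [hgetD x, if_pos ⟨hxn, hax⟩]
    · rw [Bool.eq_false_iff.mpr hax]
      simp
  rw [hfilter]
  apply List.map_congr_left
  intro x hx
  rcases List.mem_filter.mp hx with ⟨hxrot, hpx⟩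
  simp only [Function.comp, Bool.and_eq_true, decide_eq_true_eq] at hpx
  rw [hgetD x, if_pos ⟨pvRot_lt hxrot, hpx.1⟩]

-- ---- one event preserves the invariant ----

lemma pvStep_request (sp : List Int) (a : LBA) (b : StB)
    (hrel : pvRel sp a b)
    (hex : ∃ i, i < sp.length ∧ sp.getD i 0 > 0 ∧ b.active.getD i false = true) :
    pvRel sp (pvProcessA a) (pvStepB sp b "REQUEST") := by
  obtain ⟨hpow, hcl, hal, hsl, hcur, hbs, hba, hbc, hbq⟩ := hrel
  have hn : 0 < sp.length := by omega
  rcases hbqe : pvQof a with _ | ⟨⟨i0, c⟩, rest⟩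
  · -- the deque is empty: A walks a full circle and resets, B rebuilds the deque
    have hq' : b.q = [] := hbq.trans hbqe
    have hallinel : ∀ i, i < sp.length → pvElig a.capacities a.active i = false := by
      intro i hi
      have hfil : (pvRot sp.length a.cur).filter (pvElig a.capacities a.active) = [] := by
        unfold pvQof at hbqe
        rw [hpow] at hbqe
        exact List.map_eq_nil_iff.mp hbqe
      exact Bool.eq_false_iff.mpr (List.filter_eq_nil_iff.mp hfil i (pvRot_mem hcur hi))
    have hwalk := pvScan_walk sp (2 * sp.length + 2) 0 a.cur a hpow hcur hn
      (by rw [Nat.add_zero, Nat.mod_eq_of_lt hcur]) hallinel (by omega)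
    have haRq := pvReset_q sp a hpow hcl
    -- the deque of the reset state is nonempty
    obtain ⟨i, hin, hpwi, hacti⟩ := hex
    rw [hba] at hacti
    have hgetD := pvResetA_getD a (by rw [hpow]; exact hcl)
    rw [hpow] at hgetD
    have heligR : pvElig (pvResetA a).capacities a.active i = true := by
      unfold pvElig
      rw [hgetD i, if_pos ⟨hin, hacti⟩, hacti]
      simpa using hpwi
    have hne : pvQof (pvResetA a) ≠ [] := by
      intro hnil
      unfold pvQof at hnil
      have : (pvRot (pvResetA a).powers.length (pvResetA a).cur).filter
          (pvElig (pvResetA a).capacities (pvResetA a).active) = [] := List.map_eq_nil_iff.mp hnil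
      have hmem : i ∈ pvRot (pvResetA a).powers.length (pvResetA a).cur := by
        exact pvRot_mem (by rw [(show (pvResetA a).powers = a.powers from rfl), hpow]; exact hcur)
          (by rw [(show (pvResetA a).powers = a.powers from rfl), hpow]; exact hin)
      have := List.filter_eq_nil_iff.mp this i hmem
      exact this heligR
    rcases hR : pvQof (pvResetA a) with _ | ⟨⟨i0, c⟩, rest⟩
    · exact absurd hR hne
    · have hserves := pvScan_serves sp (pvResetA a) (sp.length + 2) i0 c rest
        (show (pvResetA a).powers = sp from hpow) (show (pvResetA a).cur < sp.length from hcur)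
        hR (by omega)
      have hi0n : i0 < sp.length := pvQof_head_lt sp (pvResetA a) i0 c rest hpow hR
      have hA : pvProcessA a = pvServe (pvResetA a) i0 := by
        unfold pvProcessA
        rw [hpow, hwalk]
        have : 2 * sp.length + 2 - (sp.length - 0) = sp.length + 2 := by omega
        rw [this]
        exact hserves.1
      have hB : pvStepB sp b "REQUEST" =
          { served := b.served.set i0 (b.served.getD i0 0 + 1), active := b.active,
            cur := (i0 + 1) % sp.length,
            q := if c > 1 then rest ++ [(i0, c - 1)] else rest } := by
        unfold pvStepB
        rw [if_pos rfl]
        dsimp only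
        rw [hq']
        rw [List.isEmpty_nil, if_pos rfl]
        rw [hba, hbc]
        rw [← haRq, hR]
      have hpowR : (pvResetA a).powers = sp := hpow
      rw [hA, hB]
      refine ⟨hpowR, ?_, ?_, ?_, ?_, ?_, ?_, ?_, ?_⟩
      · simpa [pvServe, pvResetA_length] using hcl
      · exact hal
      · simpa [pvServe] using hsl
      · simp only [pvServe, hpowR]
        exact Nat.mod_lt _ hn
      · simp [pvServe, hbs, pvResetA_served]
      · exact hba
      · simp [pvServe, hpowR]
      · exact (pvServe_q sp (pvResetA a) i0 c rest hpow hcur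
          (by rw [pvResetA_length]; exact hcl) hR).symm
  · -- the deque is nonempty: A's scan serves its head directly
    have hq' : b.q = (i0, c) :: rest := hbq.trans hbqe
    have hserves := pvScan_serves sp a (2 * sp.length + 2) i0 c rest hpow hcur hbqe (by omega)
    have hi0n : i0 < sp.length := pvQof_head_lt sp a i0 c rest hpow hbqe
    have hA : pvProcessA a = pvServe a i0 := by
      unfold pvProcessA
      rw [hpow]
      exact hserves.1
    have hB : pvStepB sp b "REQUEST" =
        { served := b.served.set i0 (b.served.getD i0 0 + 1), active := b.active,
          cur := (i0 + 1) % sp.length,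
          q := if c > 1 then rest ++ [(i0, c - 1)] else rest } := by
      unfold pvStepB
      rw [if_pos rfl]
      dsimp only
      rw [hq']
      rfl
    rw [hA, hB]
    refine ⟨hpow, ?_, ?_, ?_, ?_, ?_, ?_, ?_, ?_⟩
    · simpa [pvServe] using hcl
    · exact hal
    · simpa [pvServe] using hsl
    · simp only [pvServe, hpow]
      exact Nat.mod_lt _ hn
    · simp [pvServe, hbs]
    · exact hba
    · simp [pvServe, hpow]
    · exact (pvServe_q sp a i0 c rest hpow hcur hcl hbqe).symm

lemma pvStep_fail (sp : List Int) (a : LBA) (b : StB) (e : String)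
    (hrel : pvRel sp a b) (hne : e ≠ "REQUEST")
    (hs : PySem.Str.startswith e "FAIL" = true)
    (idx : Int) (hidx : pvFailIdx? e = some idx)
    (hlo : -(sp.length : Int) ≤ idx) (hhi : idx < sp.length) :
    pvRel sp (pvStepA a e) (pvStepB sp b e) ∧
      (pvStepB sp b e).active =
        b.active.set ((if idx < 0 then idx + (sp.length : Int) else idx)).toNat false := by
  obtain ⟨hpow, hcl, hal, hsl, hcur, hbs, hba, hbc, hbq⟩ := hrel
  have hparse : (PySem.List.pyGet? (PySem.Str.split₀ e) 1).bind PySem.Int.ofStr? = some idx := by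
    unfold pvFailIdx? at hidx
    rwa [if_pos hs] at hidx
  set jN : Nat := ((if idx < 0 then idx + (sp.length : Int) else idx)).toNat with hjN
  have hjlt : jN < sp.length := by
    rw [hjN]
    split <;> omega
  have hsetA : PySem.List.pySetD a.active idx false = a.active.set jN false := by
    unfold PySem.List.pySetD PySem.List.pySet? PySem.List.pyIdx?
    rw [hal]
    by_cases hneg : idx < 0
    · rw [if_neg (by omega), if_pos (by omega)]
      have : sp.length - (-idx).toNat = jN := by rw [hjN, if_pos hneg]; omega
      rw [this]
      rfl
    · rw [if_pos (by omega), if_pos (by exact_mod_cast hhi)]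
      have : idx.toNat = jN := by rw [hjN, if_neg hneg]
      rw [this]
      rfl
  have hsetB : PySem.List.pySetD b.active idx false = a.active.set jN false := by
    rw [hba]; exact hsetA
  have hA : pvStepA a e = { a with active := a.active.set jN false } := by
    unfold pvStepA
    rw [if_neg hne, if_pos hs, hparse]
    dsimp only
    rw [hsetA]
  have hB : pvStepB sp b e =
      { b with active := a.active.set jN false,
               q := b.q.filter (fun p => (a.active.set jN false).getD p.1 false) } := by
    unfold pvStepB
    rw [if_neg hne, if_pos hs]
    dsimp only
    rw [hparse]
    dsimp only
    rw [hsetB]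
  rw [hA, hB]
  refine ⟨⟨hpow, hcl, by simpa using hal, hsl, hcur, hbs, rfl, hbc, ?_⟩, by rw [hba]⟩
  -- the deque after a FAIL: exactly the entries of still-active servers survive
  rw [hbq]
  unfold pvQof
  dsimp only
  rw [List.filter_map, List.filter_filter]
  apply congrArg
  apply List.filter_congr
  intro x hx
  unfold pvElig
  simp only [Function.comp]
  by_cases hxj : x = jN
  · subst hxj
    rw [pvGetD_set _ _ _ (by omega : jN < a.active.length) _, if_pos rfl]
    simp
  · rw [pvGetD_set _ _ _ (by omega : jN < a.active.length) _, if_neg hxj]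
    cases a.active.getD x false <;> simp

lemma pvStepB_request_active (sp : List Int) (b : StB) :
    (pvStepB sp b "REQUEST").active = b.active := by
  unfold pvStepB
  rw [if_pos rfl]
  dsimp only
  split <;> rfl

lemma pvFailNorm_none {n : Nat} {e : String} (h : PySem.Str.startswith e "FAIL" = false) :
    pvFailNorm? n e = none := by
  unfold pvFailNorm? pvFailIdx?
  rw [h]
  simp

-- ---- the main fold ----

lemma pvFold_rel (sp : List Int) : ∀ (rest done : List String) (a : LBA) (b : StB),
    Pre_solution sp (done ++ rest) →
    pvRel sp a b →
    (∀ i, i < sp.length →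
        (b.active.getD i false = true ↔ ∀ e ∈ done, pvFailNorm? sp.length e ≠ some i)) →
    pvRel sp (rest.foldl pvStepA a) (rest.foldl (pvStepB sp) b) := by
  intro rest
  induction rest with
  | nil => intro done a b _ hrel _; exact hrel
  | cons e rest ih =>
    intro done a b hpre hrel hchar
    have hlen_act : b.active.length = sp.length := by
      rw [hrel.2.2.2.2.2.2.1]; exact hrel.2.2.1
    have hpre' : Pre_solution sp ((done ++ [e]) ++ rest) := by
      rw [List.append_assoc]
      exact hpre
    simp only [List.foldl_cons]
    by_cases he : e = "REQUEST"
    · subst he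
      -- the Pre_ clause at position done.length provides a live server
      obtain ⟨-, -, hreq⟩ := hpre
      have hk : done.length < (done ++ "REQUEST" :: rest).length := by
        simp
      have hat : (done ++ "REQUEST" :: rest)[done.length] = "REQUEST" := by
        rw [List.getElem_append_right le_rfl]
        simp
      obtain ⟨i, hin, hpwi, hnofail⟩ := hreq done.length hk hat
      have hact : b.active.getD i false = true := by
        rw [(hchar i hin).2]
        intro e' he'
        obtain ⟨j, hj, hje⟩ := List.mem_iff_getElem.mp he'
        have := hnofail j (by omega)
        rwa [List.getElem_append_left hj, hje] at this
      have hrel' := pvStep_request sp a b hrel ⟨i, hin, hpwi, hact⟩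
      refine ih (done ++ ["REQUEST"]) _ _ hpre' hrel' ?_
      intro i' hi'
      rw [pvStepB_request_active]
      rw [hchar i' hi']
      constructor
      · intro h e' he'
        rcases List.mem_append.mp he' with h2 | h2
        · exact h e' h2
        · rw [List.mem_singleton.mp h2]
          rw [pvFailNorm_none (by decide)]
          simp
      · intro h e' he'
        exact h e' (List.mem_append_left _ he')
    · by_cases hs : PySem.Str.startswith e "FAIL" = true
      · obtain ⟨-, hfail, -⟩ := hpre
        obtain ⟨idx, hidx, hlo, hhi⟩ := hfail e (by simp) hs
        obtain ⟨hrel', hbact⟩ := pvStep_fail sp a b e hrel he hs idx hidx hlo hhi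
        set jN : Nat := ((if idx < 0 then idx + (sp.length : Int) else idx)).toNat with hjN
        have hjlt : jN < sp.length := by
          rw [hjN]; split <;> omega
        have hnorm : pvFailNorm? sp.length e = some jN := by
          unfold pvFailNorm?
          rw [hidx]
          rfl
        refine ih (done ++ [e]) _ _ hpre' hrel' ?_
        intro i' hi'
        rw [hbact, pvGetD_set _ _ _ (by omega : jN < b.active.length) _]
        by_cases hij : i' = jN
        · subst hij
          rw [if_pos rfl]
          constructor
          · intro h; exact absurd h (by simp)
          · intro h
            have := h e (by simp)
            rw [hnorm] at this
            exact absurd rfl this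
        · rw [if_neg hij, hchar i' hi']
          constructor
          · intro h e' he'
            rcases List.mem_append.mp he' with h2 | h2
            · exact h e' h2
            · rw [List.mem_singleton.mp h2, hnorm]
              intro hcontra
              exact hij (Option.some.inj hcontra).symm
          · intro h e' he'
            exact h e' (List.mem_append_left _ he')
      · -- an ignored event: both machines keep their state
        have hA : pvStepA a e = a := by
          unfold pvStepA
          rw [if_neg he, if_neg (by rw [Bool.eq_false_iff.mpr hs]; exact Bool.false_ne_true)]
        have hB : pvStepB sp b e = b := by
          unfold pvStepB
          rw [if_neg he, if_neg (by rw [Bool.eq_false_iff.mpr hs]; exact Bool.false_ne_true)]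
        rw [hA, hB]
        refine ih (done ++ [e]) a b hpre' hrel ?_
        intro i' hi'
        rw [hchar i' hi']
        constructor
        · intro h e' he'
          rcases List.mem_append.mp he' with h2 | h2
          · exact h e' h2
          · rw [List.mem_singleton.mp h2]
            rw [pvFailNorm_none (Bool.eq_false_iff.mpr hs)]
            simp
        · intro h e' he'
          exact h e' (List.mem_append_left _ he')

-- ---- the final extraction agrees ----

-- max(..., key=lambda i: (k1 i, k2 i)) keeps a lexicographically maximal element
lemma pvMax2_aux (k1 k2 : Int → Int) : ∀ (xs : List Int) (m : Int),
    ∃ r, PySem.List.max2? (m :: xs) k1 k2 = some r ∧ (r ∈ xs ∨ r = m) ∧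
      (k1 m < k1 r ∨ (k1 m = k1 r ∧ k2 m ≤ k2 r)) ∧
      (∀ y ∈ xs, k1 y < k1 r ∨ (k1 y = k1 r ∧ k2 y ≤ k2 r)) := by
  intro xs
  induction xs with
  | nil =>
    intro m
    refine ⟨m, by simp [PySem.List.max2?], Or.inr rfl, Or.inr ⟨rfl, le_refl _⟩, by simp⟩
  | cons x xs ih =>
    intro m
    by_cases hcond : (decide (k1 m < k1 x) || (!decide (k1 x < k1 m) && decide (k2 m < k2 x))) = true
    · have hstep : PySem.List.max2? (m :: x :: xs) k1 k2 = PySem.List.max2? (x :: xs) k1 k2 := by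
        unfold PySem.List.max2?
        simp only [List.foldl_cons]
        rw [if_pos hcond]
      simp only [Bool.or_eq_true, Bool.and_eq_true, Bool.not_eq_true', decide_eq_true_eq,
        decide_eq_false_iff_not] at hcond
      obtain ⟨r, hfold, hmem, hchain, hall⟩ := ih x
      refine ⟨r, hstep.trans hfold, ?_, ?_, ?_⟩
      · rcases hmem with h2 | h2
        · exact Or.inl (List.mem_cons_of_mem _ h2)
        · exact Or.inl (h2 ▸ List.mem_cons_self)
      · omega
      · intro y hy
        rcases List.mem_cons.mp hy with h2 | h2
        · subst h2; exact hchain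
        · exact hall y h2
    · have hstep : PySem.List.max2? (m :: x :: xs) k1 k2 = PySem.List.max2? (m :: xs) k1 k2 := by
        unfold PySem.List.max2?
        simp only [List.foldl_cons]
        rw [if_neg hcond]
      simp only [Bool.or_eq_true, Bool.and_eq_true, Bool.not_eq_true', decide_eq_true_eq,
        decide_eq_false_iff_not, not_or, not_and, not_lt] at hcond
      obtain ⟨r, hfold, hmem, hchain, hall⟩ := ih m
      refine ⟨r, hstep.trans hfold, ?_, hchain, ?_⟩
      · rcases hmem with h2 | h2
        · exact Or.inl (List.mem_cons_of_mem _ h2)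
        · exact Or.inr h2
      · intro y hy
        rcases List.mem_cons.mp hy with h2 | h2
        · subst h2
          obtain ⟨hc1, hc2⟩ := hcond
          by_cases h4 : k1 y = k1 m
          · have := hc2 (by omega)
            omega
          · omega
        · exact hall y h2

lemma pvMost_eq (st : LBA) (h : st.served ≠ []) :
    pvMostA st = pvMostB st.served.length st.served := by
  have hn : 0 < st.served.length := List.length_pos_iff.mpr h
  set sv := st.served with hsv
  set n := sv.length with hnn
  -- the maximum value of the served list
  rcases hm : PySem.List.max? sv (fun x => x) with - | m
  · exact absurd ((PySem.List.max?_eq_none_iff sv (fun x => x)).mp hm) h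
  have hmem : m ∈ sv := PySem.List.max?_mem hm
  have hmax : ∀ y ∈ sv, y ≤ m := fun y hy => PySem.List.max?_isMax hm y hy
  -- A's downward scan
  have hL : PySem.List.pyRange ((n : Int) - 1) (-1) (-1)
      = (List.range n).map (fun k : Nat => (n : Int) - 1 - (k : Int)) := by
    rw [PySem.List.pyRange_neg_one]
    have heq : ((n : Int) - 1 - (-1)).toNat = n := by omega
    rw [heq]
  have hLlen : (PySem.List.pyRange ((n : Int) - 1) (-1) (-1)).length = n := by
    rw [hL]; simp
  have hLget : ∀ u, (hu : u < n) →
      (PySem.List.pyRange ((n : Int) - 1) (-1) (-1))[u]'(by rw [hLlen]; exact hu)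
        = (n : Int) - 1 - (u : Int) := by
    intro u hu
    simp [hL]
  have hpred : ∀ (u : Nat), u < n →
      PySem.List.pyGetD sv ((n : Int) - 1 - (u : Int)) 0 = sv[n - 1 - u]'(by omega) := by
    intro u hu
    have hcast : (n : Int) - 1 - (u : Int) = ((n - 1 - u : Nat) : Int) := by omega
    rw [hcast, PySem.List.pyGetD_natCast, List.getD_eq_getElem _ _ (by omega)]
  -- the scan finds something (the maximum is attained somewhere)
  obtain ⟨k, hk, hks⟩ := List.mem_iff_getElem.mp hmem
  have hfind_ex : ∃ x ∈ PySem.List.pyRange ((n : Int) - 1) (-1) (-1),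
      (fun i => PySem.List.pyGetD sv i 0 == m) x = true := by
    refine ⟨(n : Int) - 1 - ((n - 1 - k : Nat) : Int), ?_, ?_⟩
    · rw [hL]
      exact List.mem_map.mpr ⟨n - 1 - k, List.mem_range.mpr (by omega), rfl⟩
    · simp only [beq_iff_eq]
      rw [hpred _ (by omega)]
      have heq : n - 1 - (n - 1 - k) = k := by omega
      simp only [heq]
      exact hks
  rcases hfind : (PySem.List.pyRange ((n : Int) - 1) (-1) (-1)).find?
      (fun i => PySem.List.pyGetD sv i 0 == m) with - | r
  · rw [List.find?_eq_none] at hfind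
    obtain ⟨x, hx1, hx2⟩ := hfind_ex
    exact absurd hx2 (by simpa using hfind x hx1)
  obtain ⟨hpr, t, ht, hLt, hfirst⟩ := List.find?_eq_some_iff_getElem.mp hfind
  have htn : t < n := by rw [hLlen] at ht; exact ht
  have hrval : r = (n : Int) - 1 - (t : Int) := by rw [← hLt, hLget t htn]
  have hrt : sv[n - 1 - t]'(by omega) = m := by
    simp only [beq_iff_eq] at hpr
    rw [hrval, hpred t htn] at hpr
    exact hpr
  have hrfirst : ∀ u, u < t → sv[n - 1 - u]'(by omega) ≠ m := by
    intro u hu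
    have h5 := hfirst u (by omega)
    rw [hLget u (by omega)] at h5
    simp only [Bool.not_eq_eq_eq_not, Bool.not_true, beq_eq_false_iff_ne] at h5
    rw [hpred u (by omega)] at h5
    exact h5
  -- B's lexicographic maximum over range(n)
  have hrange : PySem.List.pyRange 0 (n : Int) 1
      = 0 :: PySem.List.pyRange 1 (n : Int) 1 := by
    have := PySem.List.pyRange_one_cons (a := 0) (b := (n : Int)) (by omega)
    simpa using this
  obtain ⟨r', hfold, hmem', hchain, hall⟩ := pvMax2_aux
    (fun i => PySem.List.pyGetD sv i 0) (fun i => i)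
    (PySem.List.pyRange 1 (n : Int) 1) 0
  have hmax2 : PySem.List.max2? (PySem.List.pyRange 0 (n : Int) 1)
      (fun i => PySem.List.pyGetD sv i 0) (fun i => i) = some r' := by
    rw [hrange]
    exact hfold
  have hr'mem : r' ∈ PySem.List.pyRange 0 (n : Int) 1 := by
    rw [hrange]
    rcases hmem' with h2 | h2
    · exact List.mem_cons_of_mem _ h2
    · exact h2 ▸ List.mem_cons_self
  have hr'range : 0 ≤ r' ∧ r' < (n : Int) := PySem.List.mem_pyRange_one.mp hr'mem
  have hall' : ∀ y ∈ PySem.List.pyRange 0 (n : Int) 1,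
      PySem.List.pyGetD sv y 0 < PySem.List.pyGetD sv r' 0 ∨
        (PySem.List.pyGetD sv y 0 = PySem.List.pyGetD sv r' 0 ∧ y ≤ r') := by
    intro y hy
    rw [hrange] at hy
    rcases List.mem_cons.mp hy with h2 | h2
    · exact h2 ▸ hchain
    · exact hall y h2
  -- the two chosen indices agree
  have hgetr' : PySem.List.pyGetD sv r' 0 = sv[r'.toNat]'(by omega) :=
    PySem.List.pyGetD_eq_getElem sv 0 (by omega) (by omega)
  have hler' : sv[r'.toNat]'(by omega) ≤ m := hmax _ (List.getElem_mem _)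
  have hlexr := hall' r (by rw [PySem.List.mem_pyRange_one]; omega)
  have hgetr : PySem.List.pyGetD sv r 0 = m := by
    rw [hrval, hpred t htn]
    exact hrt
  have hr'm : sv[r'.toNat]'(by omega) = m ∧ r ≤ r' := by
    rcases hlexr with h2 | ⟨h2a, h2b⟩
    · rw [hgetr, hgetr'] at h2
      omega
    · rw [hgetr, hgetr'] at h2a
      exact ⟨h2a.symm, h2b⟩
  have hr'ler : r' ≤ r := by
    by_contra hcon
    have hu : n - 1 - r'.toNat < t := by omega
    refine hrfirst _ hu ?_
    simp only [show n - 1 - (n - 1 - r'.toNat) = r'.toNat from by omega]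
    exact hr'm.1
  have hrr' : r = r' := le_antisymm hr'm.2 hr'ler
  -- assemble both sides
  unfold pvMostA pvMostB
  rw [← hsv, ← hnn, hm]
  dsimp only
  rw [hfind]
  dsimp only
  rw [hmax2]
  exact hrr' 

lemma pvRot_zero (n : Nat) : pvRot n 0 = List.range n := by
  unfold pvRot
  rw [show (List.range n).map (fun j => (0 + j) % n) = (List.range n).map id from
    List.map_congr_left (fun j hj => by
      simp [Nat.mod_eq_of_lt (List.mem_range.mp hj)])]
  exact List.map_id _

lemma pvRel_init (sp : List Int) (h : sp ≠ []) : pvRel sp (pvInitA sp) (pvInitB sp) := by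
  have hn : 0 < sp.length := List.length_pos_iff.mpr h
  refine ⟨rfl, rfl, by simp [pvInitA], by simp [pvInitA], hn, by simp [pvInitA, pvInitB], by simp [pvInitA, pvInitB], rfl, ?_⟩
  unfold pvInitB pvQof pvInitA
  dsimp only
  rw [pvRot_zero, List.filter_map]
  refine congrArg _ (List.filter_congr ?_)
  intro x hx
  unfold pvElig
  have : (List.replicate sp.length true).getD x false = true := by
    simp [List.getD_eq_getElem?_getD, List.mem_range.mp hx]
  rw [this]
  simp [Function.comp]

-- ===== VERDICT (by name: the statement is the Claim_ definition above) =====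
theorem solution_spec : Claim_equal_solution := by
  intro sp events _ hpre
  have hn : 0 < sp.length := List.length_pos_iff.mpr hpre.1
  have hchar0 : ∀ i, i < sp.length →
      ((pvInitB sp).active.getD i false = true ↔
        ∀ e ∈ ([] : List String), pvFailNorm? sp.length e ≠ some i) := by
    intro i hi
    simp [pvInitB, List.getD_eq_getElem?_getD, hi]
  have hrel := pvFold_rel sp events [] (pvInitA sp) (pvInitB sp)
    hpre (pvRel_init sp hpre.1) hchar0
  obtain ⟨hpow, hcl, hal, hsl, hcur, hbs, hba, hbc, hbq⟩ := hrel
  unfold Spec_solution solution solution_alt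
  have hserved_ne : (events.foldl pvStepA (pvInitA sp)).served ≠ [] := by
    intro hnil
    rw [hnil] at hsl
    simp at hsl
    omega
  rw [pvMost_eq _ hserved_ne, hsl, hbs]
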